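-- pv_equiv track=rewrite | github.com/JohnBee/AoC-2019 | python/Day17.py | calc_alignment_sum
-- ===== SOURCE A (Python) =====
-- def calc_alignment_sum(coords_map):
--     def check_coord(in_pos):
--         if in_pos in coords_map.keys() and coords_map[in_pos] == "#":
--             return True
--         else:
--             return False
--     crosses = []
--     for pos in coords_map:
--         if coords_map[pos] == "#":
--             if check_coord((pos[0], pos[1] - 1)) and check_coord((pos[0], pos[1] + 1)) and \
--                     check_coord((pos[0] - 1, pos[1])) and check_coord((pos[0] + 1, pos[1])):
--                 crosses.append(pos)
--     return sum([a[0]*a[1] for a in crosses])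
-- ===== SOURCE B (Python) =====
-- def calc_alignment_sum(coords_map):
--     # Scatter pass: every scaffold cell deposits one "hit" on each of its four
--     # neighbour positions; a scaffold cell with exactly 4 hits is an intersection.
--     neighbour_hits = {}
--     for (x, y), tile in coords_map.items():
--         if tile == "#":
--             for q in ((x, y - 1), (x, y + 1), (x - 1, y), (x + 1, y)):
--                 neighbour_hits[q] = neighbour_hits.get(q, 0) + 1
--     total = 0
--     for (x, y), tile in coords_map.items():
--         if tile == "#" and neighbour_hits.get((x, y), 0) == 4:
--             total += x * y
--     return total
-- ===== Notes on version B (the rewrite author's own statement) =====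
-- stated objective: alternative
-- what changed: A gathers: for each '#' cell it looks up its four neighbours in the grid dict; B scatters: one pass deposits a hit-count on each neighbour position of every '#' cell into a counter dict, then a cell is an intersection iff it is '#' and collected exactly 4 hits.
import Mathlib
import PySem

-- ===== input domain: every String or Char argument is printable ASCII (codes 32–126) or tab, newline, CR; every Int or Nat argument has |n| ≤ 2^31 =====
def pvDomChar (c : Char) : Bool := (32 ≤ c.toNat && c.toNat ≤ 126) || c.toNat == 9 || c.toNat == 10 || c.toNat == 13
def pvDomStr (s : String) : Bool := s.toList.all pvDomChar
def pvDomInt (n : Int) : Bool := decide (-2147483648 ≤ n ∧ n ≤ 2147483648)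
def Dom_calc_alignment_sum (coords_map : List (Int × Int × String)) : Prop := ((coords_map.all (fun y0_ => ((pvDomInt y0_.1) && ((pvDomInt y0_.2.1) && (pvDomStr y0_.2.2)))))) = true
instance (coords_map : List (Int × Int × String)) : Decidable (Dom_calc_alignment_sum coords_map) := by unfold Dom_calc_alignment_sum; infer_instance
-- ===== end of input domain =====

-- B replaces A's gather-style per-cell neighbour lookups by a scatter/counting pass: every
-- scaffold cell deposits one hit on each of its four neighbour positions, and a scaffold cell
-- with exactly 4 hits is an intersection (objective: alternative; same cost).

-- ===== PORT A =====
-- shared input decoding: the assoc list stands for the Python dict (insertion with overwrite, like dict())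
def pvDictOf (coords_map : List (Int × Int × String)) : PySem.Dict (Int × Int) String :=
  coords_map.foldl (fun d p => d.insert (p.1, p.2.1) p.2.2) PySem.Dict.empty

def calc_alignment_sum (coords_map : List (Int × Int × String)) : Int :=
  let d := pvDictOf coords_map
  let check_coord : Int × Int → Bool := fun q =>
    match d.get? q with
    | some v => v == "#"
    | none => false
  let crosses : List (Int × Int) :=
    d.keys.foldl (fun acc pos =>
      if d.getD pos "" == "#" then
        if check_coord (pos.1, pos.2 - 1) && check_coord (pos.1, pos.2 + 1) &&
           check_coord (pos.1 - 1, pos.2) && check_coord (pos.1 + 1, pos.2) then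
          acc ++ [pos]
        else acc
      else acc) []
  (crosses.map (fun a => a.1 * a.2)).sum

-- ===== PORT B =====
def calc_alignment_sum_alt (coords_map : List (Int × Int × String)) : Int :=
  let d := pvDictOf coords_map
  let neighbour_hits : PySem.Dict (Int × Int) Int :=
    d.items.foldl (fun h pv =>
      if pv.2 == "#" then
        [(pv.1.1, pv.1.2 - 1), (pv.1.1, pv.1.2 + 1), (pv.1.1 - 1, pv.1.2), (pv.1.1 + 1, pv.1.2)].foldl
          (fun h q => h.insert q (h.getD q 0 + 1)) h
      else h) PySem.Dict.empty
  d.items.foldl (fun total pv =>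
    if pv.2 == "#" && neighbour_hits.getD pv.1 0 == 4 then total + pv.1.1 * pv.1.2 else total) 0

-- ===== PRECONDITION & SPEC =====
def Spec_calc_alignment_sum (coords_map : List (Int × Int × String)) (out : Int) : Prop := out = calc_alignment_sum_alt coords_map
instance (coords_map : List (Int × Int × String)) (out : Int) : Decidable (Spec_calc_alignment_sum coords_map out) := by unfold Spec_calc_alignment_sum; infer_instance

-- ===== CLAIM (what is proved, stated in full; the proofs are below) =====
def Claim_equal_calc_alignment_sum : Prop := ∀ (coords_map : List (Int × Int × String)), Dom_calc_alignment_sum coords_map → Spec_calc_alignment_sum coords_map (calc_alignment_sum coords_map)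

-- ===== LEMMAS AND PROOFS =====

-- the four neighbours of a position, in the order both programs use
def pvNb (p : Int × Int) : List (Int × Int) :=
  [(p.1, p.2 - 1), (p.1, p.2 + 1), (p.1 - 1, p.2), (p.1 + 1, p.2)]

theorem pvDictOf_nodup (coords_map : List (Int × Int × String)) : (pvDictOf coords_map).keys.Nodup := by
  have := PySem.Dict.nodup_keys_foldl_insert_key (κ := Int × Int) (ν := String) coords_map
      (fun p => (p.1, p.2.1)) (fun _ p => p.2.2) PySem.Dict.empty (by simp [PySem.Dict.empty, PySem.Dict.keys])
  simpa [pvDictOf] using this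

theorem pv_check_eq (d : PySem.Dict (Int × Int) String) (hnd : d.keys.Nodup) (q : Int × Int) :
    (match d.get? q with
      | some v => v == "#"
      | none => false)
    = ((d.items.filter (fun pv => pv.2 == "#")).map Prod.fst).contains q := by
  obtain ⟨l⟩ := d
  simp only [PySem.Dict.get?, PySem.Dict.keys] at *
  induction l with
  | nil => simp
  | cons hd t ih =>
    obtain ⟨k, v⟩ := hd
    simp only [List.map_cons, List.nodup_cons] at hnd
    by_cases hk : k = q
    · subst hk
      by_cases hv : v = "#"
      · simp [hv]
      · have hkt : (k, "#") ∉ t := fun h => hnd.1 (List.mem_map_of_mem h)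
        simp [hv, hkt]
    · have := ih hnd.2
      by_cases hv : v = "#" <;>
        simp [hk, hv, this, Ne.symm hk]

theorem pv_getD_eq (d : PySem.Dict (Int × Int) String) (hnd : d.keys.Nodup) (q : Int × Int) :
    (d.getD q "" == "#")
    = ((d.items.filter (fun pv => pv.2 == "#")).map Prod.fst).contains q := by
  rw [← pv_check_eq d hnd q]
  unfold PySem.Dict.getD
  cases d.get? q <;> simp

theorem pv_filter_sublist (l₁ l₂ : List (Int × Int)) (h : l₁.Sublist l₂) (hn : l₂.Nodup) :
    l₂.filter (fun x => l₁.contains x) = l₁ := by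
  induction h with
  | slnil => simp
  | @cons t₁ t₂ a h ih =>
    simp only [List.nodup_cons] at hn
    have ha : ¬ a ∈ t₁ := fun hm => hn.1 (h.subset hm)
    rw [List.filter_cons_of_neg (by simpa using ha)]
    exact ih hn.2
  | @cons₂ t₁ t₂ a h ih =>
    simp only [List.nodup_cons] at hn
    have hc : t₂.filter (fun x => (a :: t₁).contains x) = t₂.filter (fun x => t₁.contains x) := by
      apply List.filter_congr
      intro x hx
      have hxa : x ≠ a := fun he => hn.1 (he ▸ hx)
      simp [hxa]
    simp only [List.filter_cons, hc, ih hn.2]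
    simp

theorem pv_foldl_nested (c n : (Int × Int) → Bool) (l : List (Int × Int)) :
    l.foldl (fun acc pos => if c pos then (if n pos then acc ++ [pos] else acc) else acc) []
    = (l.filter (fun x => c x)).filter n := by
  have hf : (fun (acc : List (Int × Int)) pos => if c pos then (if n pos then acc ++ [pos] else acc) else acc)
      = (fun acc pos => if (n pos && c pos) then acc ++ [id pos] else acc) := by
    funext acc pos
    by_cases h1 : c pos <;> by_cases h2 : n pos <;> simp [h1, h2]
  rw [hf, PySem.List.foldl_append_if, List.filter_filter]
  simp

-- the nested counting loop is the counter of the flattened neighbour stream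
theorem pv_hits_eq_counter (l : List ((Int × Int) × String)) :
    l.foldl (fun h pv =>
        if pv.2 == "#" then (pvNb pv.1).foldl (fun h q => h.insert q (h.getD q 0 + 1)) h else h)
      PySem.Dict.empty
    = PySem.Dict.counter (l.flatMap (fun pv => if pv.2 == "#" then pvNb pv.1 else [])) := by
  rw [← PySem.Dict.foldl_insert_getD_add_one_eq_counter]
  generalize PySem.Dict.empty = h0
  induction l generalizing h0 with
  | nil => rfl
  | cons hd t ih =>
    rw [List.foldl_cons, List.flatMap_cons]
    by_cases hc : (hd.2 == "#") = true
    · rw [if_pos hc, if_pos hc, List.foldl_append]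
      exact ih _
    · rw [if_neg hc, if_neg hc, List.nil_append]
      exact ih h0

-- the scatter stream is exactly the neighbours of the scaffold positions
theorem pv_stream_eq (l : List ((Int × Int) × String)) :
    l.flatMap (fun pv => if pv.2 == "#" then pvNb pv.1 else [])
    = ((l.filter (fun pv => pv.2 == "#")).map Prod.fst).flatMap pvNb := by
  induction l with
  | nil => rfl
  | cons hd t ih =>
    by_cases hc : (hd.2 == "#") = true
    · rw [List.flatMap_cons, if_pos hc, List.filter_cons, if_pos hc, List.map_cons,
        List.flatMap_cons, ih]
    · rw [List.flatMap_cons, if_neg hc, List.filter_cons, if_neg hc, List.nil_append, ih]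

-- a 0/1-sum over Y counts x's occurrences
theorem pv_sum_if_eq_count (Y : List (Int × Int)) (x : Int × Int) :
    (Y.map (fun c => if c = x then 1 else 0)).sum = Y.count x := by
  induction Y with
  | nil => simp
  | cons y ys ih =>
    simp only [List.map_cons, List.sum_cons, List.count_cons, ih]
    by_cases h : y = x
    · simp [h]; omega
    · simp [h]

-- double counting: occurrences of X's elements in Y = occurrences of Y's elements in X
theorem pv_sum_count (X Y : List (Int × Int)) :
    (X.map (fun n => Y.count n)).sum = (Y.map (fun c => X.count c)).sum := by
  induction X with
  | nil => simp
  | cons x xs ih =>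
    have h : (Y.map (fun c => (x :: xs).count c)).sum
        = (Y.map (fun c => if c = x then 1 else 0)).sum + (Y.map (fun c => xs.count c)).sum := by
      rw [← List.sum_map_add]
      apply congrArg
      apply List.map_congr_left
      intro c _
      rw [List.count_cons]
      by_cases h : c = x
      · simp [h]; omega
      · simp [h]; exact fun he => h he.symm
    simp only [List.map_cons, List.sum_cons, ih, h, pv_sum_if_eq_count]

-- symmetry of the neighbour relation, as counts
theorem pv_nb_count_symm (c p : Int × Int) : (pvNb c).count p = (pvNb p).count c := by
  obtain ⟨c1, c2⟩ := c
  obtain ⟨p1, p2⟩ := p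
  simp only [pvNb, List.count_cons, List.count_nil, beq_iff_eq, Prod.mk.injEq]
  split_ifs <;> omega

theorem pv_count_nodup (l : List (Int × Int)) (h : l.Nodup) (a : Int × Int) :
    l.count a = if a ∈ l then 1 else 0 := by
  by_cases ha : a ∈ l
  · simp [ha, List.count_eq_one_of_mem h ha]
  · simp [ha, List.count_eq_zero_of_not_mem ha]

-- the hit count at p is the number of p's neighbours lying on the scaffold
theorem pv_count_key (P : List (Int × Int)) (hnd : P.Nodup) (p : Int × Int) :
    (P.flatMap pvNb).count p
    = ((pvNb p).map (fun n => if n ∈ P then 1 else 0)).sum := by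
  rw [List.count_flatMap]
  calc (P.map (List.count p ∘ pvNb)).sum
      = (P.map (fun c => (pvNb p).count c)).sum := by
        apply congrArg
        apply List.map_congr_left
        intro c _
        exact pv_nb_count_symm c p
    _ = ((pvNb p).map (fun n => P.count n)).sum := (pv_sum_count (pvNb p) P).symm
    _ = ((pvNb p).map (fun n => if n ∈ P then 1 else 0)).sum := by
        apply congrArg; apply List.map_congr_left; intro n _; exact pv_count_nodup P hnd n

-- B's accumulation loop as a filtered sum
theorem pv_foldl_if_add (l : List ((Int × Int) × String)) (c : (Int × Int) × String → Bool)
    (g : (Int × Int) × String → Int) (t : Int) :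
    l.foldl (fun t pv => if c pv then t + g pv else t) t
    = t + ((l.filter c).map g).sum := by
  induction l generalizing t with
  | nil => simp
  | cons hd tl ih =>
    by_cases h : c hd
    · simp [h, ih]; omega
    · simp [h, ih]

-- the two selection conditions coincide (count of 0/1 hits = 4 ↔ all four present)
theorem pv_cond_eq (P : List (Int × Int)) (hnd : P.Nodup) (p : Int × Int) :
    ((↑((P.flatMap pvNb).count p) : Int) == 4)
    = (P.contains (p.1, p.2 - 1) && P.contains (p.1, p.2 + 1) &&
       P.contains (p.1 - 1, p.2) && P.contains (p.1 + 1, p.2)) := by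
  rw [pv_count_key P hnd p]
  simp only [pvNb, List.map_cons, List.map_nil, List.sum_cons, List.sum_nil, List.contains_eq_mem]
  by_cases h1 : (p.1, p.2 - 1) ∈ P <;> by_cases h2 : (p.1, p.2 + 1) ∈ P <;>
    by_cases h3 : (p.1 - 1, p.2) ∈ P <;> by_cases h4 : (p.1 + 1, p.2) ∈ P <;>
    simp [h1, h2, h3, h4]

theorem pv_main (coords_map : List (Int × Int × String)) :
    calc_alignment_sum coords_map = calc_alignment_sum_alt coords_map := by
  have hnd := pvDictOf_nodup coords_map
  simp only [calc_alignment_sum, calc_alignment_sum_alt]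
  revert hnd
  generalize pvDictOf coords_map = d
  intro hnd
  set P : List (Int × Int) := (d.items.filter (fun pv => pv.2 == "#")).map Prod.fst with hP
  have hkeys : d.keys = d.items.map Prod.fst := rfl
  have hsub : P.Sublist d.keys := by
    rw [hkeys]
    exact List.Sublist.map Prod.fst List.filter_sublist
  have hndP : P.Nodup := hnd.sublist hsub
  -- B's hits dict
  have hhits : ∀ q, (d.items.foldl (fun h pv =>
        if pv.2 == "#" then
          [(pv.1.1, pv.1.2 - 1), (pv.1.1, pv.1.2 + 1), (pv.1.1 - 1, pv.1.2), (pv.1.1 + 1, pv.1.2)].foldl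
            (fun h q => h.insert q (h.getD q 0 + 1)) h
        else h) PySem.Dict.empty).getD q 0
      = (↑((P.flatMap pvNb).count q) : Int) := by
    intro q
    have : ∀ pv : (Int × Int) × String,
        [(pv.1.1, pv.1.2 - 1), (pv.1.1, pv.1.2 + 1), (pv.1.1 - 1, pv.1.2), (pv.1.1 + 1, pv.1.2)]
        = pvNb pv.1 := fun pv => rfl
    simp only [this]
    rw [pv_hits_eq_counter, PySem.Dict.getD_counter, pv_stream_eq]
  -- A's side cleaned up
  rw [pv_foldl_nested]
  have houter : d.keys.filter (fun x => (d.getD x "" == "#")) = P := by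
    rw [List.filter_congr (fun x _ => pv_getD_eq d hnd x)]
    exact pv_filter_sublist P d.keys hsub hnd
  rw [houter]
  -- B's side: foldl to filtered sum, then push the filter through the map
  rw [pv_foldl_if_add, zero_add]
  have hsplit : d.items.filter (fun pv => pv.2 == "#" &&
        ((d.items.foldl (fun h pv =>
          if pv.2 == "#" then
            [(pv.1.1, pv.1.2 - 1), (pv.1.1, pv.1.2 + 1), (pv.1.1 - 1, pv.1.2), (pv.1.1 + 1, pv.1.2)].foldl
              (fun h q => h.insert q (h.getD q 0 + 1)) h
          else h) (PySem.Dict.empty : PySem.Dict (Int × Int) Int)).getD pv.1 0 == 4))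
      = (d.items.filter (fun pv => pv.2 == "#")).filter (fun pv =>
          ((↑((P.flatMap pvNb).count pv.1) : Int) == 4)) := by
    rw [List.filter_filter]
    apply List.filter_congr
    intro pv _
    simp only [hhits pv.1]
    exact (Bool.and_comm _ _)
  simp only [hsplit]
  have hmap : ((d.items.filter (fun pv => pv.2 == "#")).filter (fun pv =>
          ((↑((P.flatMap pvNb).count pv.1) : Int) == 4))).map (fun pv => pv.1.1 * pv.1.2)
      = ((P.filter (fun q => ((↑((P.flatMap pvNb).count q) : Int) == 4))).map (fun a => a.1 * a.2)) := by
    rw [hP, List.filter_map, List.map_map]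
    rfl
  rw [hmap]
  congr 2
  apply List.filter_congr
  intro p _
  have hcheck := fun q => pv_check_eq d hnd q
  rw [hcheck, hcheck, hcheck, hcheck, ← hP, ← pv_cond_eq P hndP p]

-- ===== VERDICT (by name: the statement is the Claim_ definition above) =====
theorem calc_alignment_sum_spec : Claim_equal_calc_alignment_sum := by
  intro coords_map _
  unfold Spec_calc_alignment_sum
  exact pv_main coords_map
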